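-- pv_equiv track=rewrite | github.com/TejasGupta-27/speech-assignment-2 | src/g2p_ipa.py | roman_hindi_to_ipa
-- ===== SOURCE A (Python) =====
-- from typing import Dict, List, Tuple
--
-- ROMAN_HINDI = {  # common Hinglish rime chunks; longest-match first
--     "aa": "aː", "ee": "iː", "oo": "uː",
--     "ai": "ɛː", "au": "ɔː", "ou": "oː", "ei": "eː",
--     "sh": "ʃ", "ch": "tʃ", "th": "t̪ʰ", "dh": "d̪ʱ", "ph": "pʰ", "kh": "kʰ", "gh": "gʱ", "bh": "bʱ",
--     "ny": "ɲ", "ng": "ŋ",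
--     "a": "ə", "e": "ɛ", "i": "ɪ", "o": "ɔ", "u": "ʊ",
--     "k": "k", "g": "g", "t": "ʈ", "d": "ɖ", "n": "n", "p": "p", "b": "b", "m": "m",
--     "y": "j", "r": "ɾ", "l": "l", "v": "ʋ", "w": "ʋ", "s": "s", "h": "ɦ", "f": "f", "z": "z", "j": "dʒ", "c": "k", "x": "ks", "q": "k",
-- }
--
-- ROMAN_KEYS = sorted(ROMAN_HINDI.keys(), key=len, reverse=True)
--
-- def roman_hindi_to_ipa(w: str) -> str:
--     s = w.lower()
--     i = 0
--     out: List[str] = []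
--     while i < len(s):
--         matched = False
--         for k in ROMAN_KEYS:
--             if s.startswith(k, i):
--                 out.append(ROMAN_HINDI[k])
--                 i += len(k)
--                 matched = True
--                 break
--         if not matched:
--             i += 1
--     return "".join(out)
-- ===== SOURCE B (Python) =====
-- # Single left-to-right pass over (char, successor) pairs with a skip flag,
-- # using two fixed-length tables built from compact word lists.
-- DIGRAPHS = dict(zip(
--     "aa ee oo ai au ou ei sh ch th dh ph kh gh bh ny ng".split(),
--     "a\u02d0 i\u02d0 u\u02d0 \u025b\u02d0 \u0254\u02d0 o\u02d0 e\u02d0 \u0283 t\u0283 t\u032a\u02b0 d\u032a\u02b1 p\u02b0 k\u02b0 g\u02b1 b\u02b1 \u0272 \u014b".split()))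
-- SINGLES = dict(zip(
--     "a e i o u k g t d n p b m y r l v w s h f z j c x q".split(),
--     "\u0259 \u025b \u026a \u0254 \u028a k g \u0288 \u0256 n p b m j \u027e l \u028b \u028b s \u0266 f z d\u0292 k ks k".split()))
--
-- def roman_hindi_to_ipa(w: str) -> str:
--     s = w.lower()
--     out = []
--     skip = False
--     for c, n in zip(s, list(s[1:]) + [""]):
--         if skip:
--             skip = False
--         elif n and (c + n) in DIGRAPHS:
--             out.append(DIGRAPHS[c + n])
--             skip = True
--         elif c in SINGLES:
--             out.append(SINGLES[c])
--     return "".join(out)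
-- ===== Notes on version B (the rewrite author's own statement) =====
-- stated objective: faster
-- what changed: Replaces A's while loop with an inner first-match scan over all 43 sorted keys by a single foldl over (char, successor) pairs carrying a skip flag, probing two fixed-length tables (digraphs, singles) built from compact word lists; the inner key scan disappears.
import Mathlib
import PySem

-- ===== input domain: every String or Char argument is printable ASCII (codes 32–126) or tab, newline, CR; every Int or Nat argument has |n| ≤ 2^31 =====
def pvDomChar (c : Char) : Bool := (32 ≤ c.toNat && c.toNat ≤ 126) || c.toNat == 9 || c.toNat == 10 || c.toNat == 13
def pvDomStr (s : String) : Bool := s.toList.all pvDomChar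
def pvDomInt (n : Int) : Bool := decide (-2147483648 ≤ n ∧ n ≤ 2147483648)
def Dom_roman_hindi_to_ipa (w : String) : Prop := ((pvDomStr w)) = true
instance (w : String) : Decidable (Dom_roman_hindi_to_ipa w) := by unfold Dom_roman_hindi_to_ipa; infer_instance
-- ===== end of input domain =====

-- B replaces A's while loop with its inner first-match scan over all 43 sorted keys by a
-- single foldl over (char, successor) pairs carrying a skip flag, probing two fixed-length
-- tables (digraphs, singles) built from compact word lists (objective: faster, constant-factor).

set_option maxRecDepth 200000

-- ===== PORT A =====
def romanHindi : PySem.Dict (List Char) (List Char) := PySem.Dict.ofList [(['a', 'a'], ['a', 'ː']), (['e', 'e'], ['i', 'ː']), (['o', 'o'], ['u', 'ː']), (['a', 'i'], ['ɛ', 'ː']), (['a', 'u'], ['ɔ', 'ː']), (['o', 'u'], ['o', 'ː']), (['e', 'i'], ['e', 'ː']), (['s', 'h'], ['ʃ']), (['c', 'h'], ['t', 'ʃ']), (['t', 'h'], ['t', '̪', 'ʰ']), (['d', 'h'], ['d', '̪', 'ʱ']), (['p', 'h'], ['p', 'ʰ']), (['k', 'h'], ['k', 'ʰ']), (['g', 'h'],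 ['g', 'ʱ']), (['b', 'h'], ['b', 'ʱ']), (['n', 'y'], ['ɲ']), (['n', 'g'], ['ŋ']), (['a'], ['ə']), (['e'], ['ɛ']), (['i'], ['ɪ']), (['o'], ['ɔ']), (['u'], ['ʊ']), (['k'], ['k']), (['g'], ['g']), (['t'], ['ʈ']), (['d'], ['ɖ']), (['n'], ['n']), (['p'], ['p']), (['b'], ['b']), (['m'], ['m']), (['y'], ['j']), (['r'], ['ɾ']), (['l'], ['l']), (['v'], ['ʋ']), (['w'], ['ʋ']), (['s'], ['s']), (['h'], ['ɦ']), (['f'], ['f']), (['z'], ['z']), (['j'], ['d', 'ʒ']), (['c'], ['k']), (['x'], ['k', 's']), (['q'], ['k'])]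

-- ROMAN_KEYS = sorted(ROMAN_HINDI.keys(), key=len, reverse=True)
def romanKeys : List (List Char) := PySem.List.sorted (PySem.Dict.keys romanHindi) (fun k => k.length) true

-- used by goA's termination proof (every key is nonempty)
theorem romanKeys_ne_nil : ∀ k ∈ romanKeys, k ≠ [] := by decide

-- the while loop of A: scan ROMAN_KEYS for the first key matching at the current position
set_option maxRecDepth 100000 in
def goA : List Char → List (List Char)
  | [] => []
  | c :: rest =>
    match h : List.find? (fun k => PySem.Chars.startswith (c :: rest) k) romanKeys with
    | some k => PySem.Dict.getD romanHindi k [] :: goA ((c :: rest).drop k.length)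
    | none => goA rest
termination_by cs => cs.length
decreasing_by
  · have hk := romanKeys_ne_nil k (List.mem_of_find?_eq_some h)
    have : k.length ≠ 0 := fun h0 => hk (List.length_eq_zero_iff.mp h0)
    simp only [List.length_drop, List.length_cons]
    omega
  · simp

def roman_hindi_to_ipa (w : String) : String :=
  String.ofList (PySem.Chars.join [] (goA (PySem.Chars.lower w.toList)))

-- ===== PORT B =====
-- DIGRAPHS = dict(zip("aa ee … ng".split(), "aː iː … ŋ".split()))
def digraphs : PySem.Dict (List Char) (List Char) :=
  PySem.Dict.ofList (List.zip
    (PySem.Chars.split₀ "aa ee oo ai au ou ei sh ch th dh ph kh gh bh ny ng".toList)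
    (PySem.Chars.split₀ "aː iː uː ɛː ɔː oː eː ʃ tʃ t̪ʰ d̪ʱ pʰ kʰ gʱ bʱ ɲ ŋ".toList))

-- SINGLES = dict(zip("a e … q".split(), "ə ɛ … k".split()))
def singles : PySem.Dict (List Char) (List Char) :=
  PySem.Dict.ofList (List.zip
    (PySem.Chars.split₀ "a e i o u k g t d n p b m y r l v w s h f z j c x q".toList)
    (PySem.Chars.split₀ "ə ɛ ɪ ɔ ʊ k g ʈ ɖ n p b m j ɾ l ʋ ʋ s ɦ f z dʒ k ks k".toList))

-- one step of B's loop: state = (skip flag, output chunks in reverse); p = (char, successor-or-empty)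
def stepB (st : Bool × List (List Char)) (p : Char × List Char) : Bool × List (List Char) :=
  if st.1 then (false, st.2)
  else
    match (if p.2.isEmpty then none else PySem.Dict.get? digraphs (p.1 :: p.2)) with
    | some v => (true, v :: st.2)
    | none =>
      match PySem.Dict.get? singles [p.1] with
      | some v => (false, v :: st.2)
      | none => (false, st.2)

-- zip(s, list(s[1:]) + [""])
def pairsB (cs : List Char) : List (Char × List Char) :=
  cs.zip ((cs.drop 1).map (fun c => [c]) ++ [[]])

def roman_hindi_to_ipa_alt (w : String) : String :=
  let s := PySem.Chars.lower w.toList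
  let st := (pairsB s).foldl stepB (false, [])
  String.ofList (PySem.Chars.join [] st.2.reverse)

-- ===== PRECONDITION & SPEC =====
def Spec_roman_hindi_to_ipa (w : String) (out : String) : Prop := out = roman_hindi_to_ipa_alt w
instance (w : String) (out : String) : Decidable (Spec_roman_hindi_to_ipa w out) := by unfold Spec_roman_hindi_to_ipa; infer_instance

-- ===== CLAIM (what is proved, stated in full; the proofs are below) =====
def Claim_equal_roman_hindi_to_ipa : Prop := ∀ (w : String), Dom_roman_hindi_to_ipa w → Spec_roman_hindi_to_ipa w (roman_hindi_to_ipa w)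

-- ===== LEMMAS AND PROOFS =====

-- the 2-char keys and the 1-char keys of ROMAN_HINDI, in insertion order
def twoKeys : List (List Char) := (PySem.Dict.keys romanHindi).take 17
def oneKeys : List (List Char) := (PySem.Dict.keys romanHindi).drop 17

-- the corresponding item sublists
def twoPairs : List (List Char × List Char) := romanHindi.items.take 17
def onePairs : List (List Char × List Char) := romanHindi.items.drop 17

set_option maxRecDepth 100000 in
theorem romanKeys_eq : romanKeys = twoKeys ++ oneKeys := by decide

theorem twoKeys_len : ∀ k ∈ twoKeys, k.length = 2 := by decide
theorem oneKeys_len : ∀ k ∈ oneKeys, k.length = 1 := by decide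

-- proof-side recursion bridging the two loops
def goB : List Char → List (List Char)
  | [] => []
  | c1 :: [] =>
    match PySem.Dict.get? romanHindi [c1] with
    | some v => [v]
    | none => []
  | c1 :: c2 :: rest =>
    match PySem.Dict.get? romanHindi [c1, c2] with
    | some v => v :: goB rest
    | none =>
      match PySem.Dict.get? romanHindi [c1] with
      | some v => v :: goB (c2 :: rest)
      | none => goB (c2 :: rest)
termination_by cs => cs.length

theorem find?_len2 (ks : List (List Char)) (h2 : ∀ k ∈ ks, k.length = 2)
    (c1 c2 : Char) (rest : List Char) :
    List.find? (fun k => PySem.Chars.startswith (c1 :: c2 :: rest) k) ks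
      = if [c1, c2] ∈ ks then some [c1, c2] else none := by
  induction ks with
  | nil => simp
  | cons k ks ih =>
    match k, h2 k (by simp) with
    | [a, b], _ =>
      by_cases hab : ([a, b] : List Char) = [c1, c2]
      · rw [List.find?_cons_of_pos (by rw [hab]; exact (PySem.Chars.startswith_iff _ _).mpr ⟨rest, rfl⟩)]
        simp [hab]
      · rw [List.find?_cons_of_neg, ih (fun k hk => h2 k (List.mem_cons_of_mem _ hk))]
        · have hne : ([c1, c2] : List Char) ≠ [a, b] := fun h => hab h.symm
          simp [List.mem_cons, hne]
        · intro hT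
          rcases (PySem.Chars.startswith_iff _ _).mp hT with ⟨t, ht⟩
          simp at ht
          exact hab (by simp [ht.1, ht.2.1])

theorem find?_len2_short (ks : List (List Char)) (h2 : ∀ k ∈ ks, k.length = 2) (c1 : Char) :
    List.find? (fun k => PySem.Chars.startswith [c1] k) ks = none := by
  induction ks with
  | nil => simp
  | cons k ks ih =>
    match k, h2 k (by simp) with
    | [a, b], _ =>
      rw [List.find?_cons_of_neg (by
            intro hT
            rcases (PySem.Chars.startswith_iff _ _).mp hT with ⟨t, ht⟩
            simp at ht),
          ih (fun k hk => h2 k (List.mem_cons_of_mem _ hk))]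

theorem find?_len1 (ks : List (List Char)) (h1 : ∀ k ∈ ks, k.length = 1)
    (c1 : Char) (rest : List Char) :
    List.find? (fun k => PySem.Chars.startswith (c1 :: rest) k) ks
      = if [c1] ∈ ks then some [c1] else none := by
  induction ks with
  | nil => simp
  | cons k ks ih =>
    match k, h1 k (by simp) with
    | [a], _ =>
      by_cases hac : ([a] : List Char) = [c1]
      · rw [List.find?_cons_of_pos (by rw [hac]; exact (PySem.Chars.startswith_iff _ _).mpr ⟨rest, rfl⟩)]
        simp [hac]
      · rw [List.find?_cons_of_neg (by
              intro hT
              rcases (PySem.Chars.startswith_iff _ _).mp hT with ⟨t, ht⟩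
              simp at ht
              exact hac (by simp [ht.1])),
            ih (fun k hk => h1 k (List.mem_cons_of_mem _ hk))]
        have hne : ([c1] : List Char) ≠ [a] := fun h => hac h.symm
        simp [List.mem_cons, hne]

theorem keys_split : PySem.Dict.keys romanHindi = twoKeys ++ oneKeys :=
  (List.take_append_drop 17 _).symm

theorem mem_two_iff (c1 c2 : Char) :
    [c1, c2] ∈ twoKeys ↔ (PySem.Dict.get? romanHindi [c1, c2]).isSome := by
  rw [← PySem.Dict.contains_eq_isSome_get?,
      PySem.Dict.contains_iff_mem_keys romanHindi [c1, c2], keys_split, List.mem_append]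
  constructor
  · exact Or.inl
  · rintro (h | h)
    · exact h
    · have := oneKeys_len _ h; simp at this

theorem mem_one_iff (c1 : Char) :
    [c1] ∈ oneKeys ↔ (PySem.Dict.get? romanHindi [c1]).isSome := by
  rw [← PySem.Dict.contains_eq_isSome_get?,
      PySem.Dict.contains_iff_mem_keys romanHindi [c1], keys_split, List.mem_append]
  constructor
  · exact Or.inr
  · rintro (h | h)
    · have := twoKeys_len _ h; simp at this
    · exact h

theorem get?_two_none (c1 c2 : Char) (h : [c1, c2] ∉ twoKeys) :
    PySem.Dict.get? romanHindi [c1, c2] = none := by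
  rcases hg : PySem.Dict.get? romanHindi [c1, c2] with _ | v
  · rfl
  · exact absurd ((mem_two_iff c1 c2).mpr (by simp [hg])) h

theorem get?_one_none (c1 : Char) (h : [c1] ∉ oneKeys) :
    PySem.Dict.get? romanHindi [c1] = none := by
  rcases hg : PySem.Dict.get? romanHindi [c1] with _ | v
  · rfl
  · exact absurd ((mem_one_iff c1).mpr (by simp [hg])) h

theorem goA_eq_goB (cs : List Char) : goA cs = goB cs := by
  induction cs using goA.induct with
  | case1 => simp [goA, goB]
  | case2 c rest k h ih =>
    have hc := h
    rw [romanKeys_eq, List.find?_append] at hc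
    conv_lhs => rw [goA.eq_def]
    simp only []
    split
    next k' heq =>
      rw [h] at heq
      obtain rfl : k = k' := by injection heq
      rcases rest with _ | ⟨c2, rest2⟩
      · rw [find?_len2_short twoKeys twoKeys_len c,
            find?_len1 oneKeys oneKeys_len c []] at hc
        simp only [Option.none_or] at hc
        split_ifs at hc with h1
        obtain rfl : k = [c] := by injection hc with hh; exact hh.symm
        rcases Option.isSome_iff_exists.mp ((mem_one_iff c).mp h1) with ⟨v, hv⟩
        simp [goB, hv, PySem.Dict.getD_eq_get?_getD, goA]
      · rw [find?_len2 twoKeys twoKeys_len c c2 rest2,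
            find?_len1 oneKeys oneKeys_len c (c2 :: rest2)] at hc
        by_cases h2 : [c, c2] ∈ twoKeys
        · simp only [h2, if_true, Option.some_or] at hc
          obtain rfl : k = [c, c2] := by injection hc with hh; exact hh.symm
          rcases Option.isSome_iff_exists.mp ((mem_two_iff c c2).mp h2) with ⟨v, hv⟩
          simp only [List.length_cons, List.length_nil] at ih ⊢
          simp only [List.drop_succ_cons, List.drop_zero] at ih
          simp [goB, hv, PySem.Dict.getD_eq_get?_getD, ih]
        · have h2' := get?_two_none c c2 h2
          simp only [h2, if_false, Option.none_or] at hc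
          split_ifs at hc with h1
          obtain rfl : k = [c] := by injection hc with hh; exact hh.symm
          rcases Option.isSome_iff_exists.mp ((mem_one_iff c).mp h1) with ⟨v, hv⟩
          simp only [List.length_cons, List.length_nil] at ih ⊢
          simp only [List.drop_succ_cons, List.drop_zero] at ih
          simp [goB, h2', hv, PySem.Dict.getD_eq_get?_getD, ih]
    next heq =>
      rw [h] at heq
      cases heq
  | case3 c rest h ih =>
    have hc := h
    rw [romanKeys_eq, List.find?_append] at hc
    conv_lhs => rw [goA.eq_def]
    simp only []
    split
    next k' heq =>
      rw [h] at heq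
      cases heq
    next heq =>
      rcases rest with _ | ⟨c2, rest2⟩
      · rw [find?_len2_short twoKeys twoKeys_len c,
            find?_len1 oneKeys oneKeys_len c []] at hc
        simp only [Option.none_or] at hc
        split_ifs at hc with h1
        have h1' := get?_one_none c h1
        simp [goB, h1', goA]
      · rw [find?_len2 twoKeys twoKeys_len c c2 rest2,
            find?_len1 oneKeys oneKeys_len c (c2 :: rest2)] at hc
        by_cases h2 : [c, c2] ∈ twoKeys
        · simp [h2] at hc
        · have h2' := get?_two_none c c2 h2
          simp only [h2, if_false, Option.none_or] at hc
          split_ifs at hc with h1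
          have h1' := get?_one_none c h1
          simp [goB, h2', h1', ih]

-- relating B's small tables to A's single dict, for symbolic keys

theorem get?_mk_append (l1 l2 : List (List Char × List Char)) (k : List Char) :
    (PySem.Dict.mk (l1 ++ l2)).get? k
      = ((PySem.Dict.mk l1).get? k).or ((PySem.Dict.mk l2).get? k) := by
  induction l1 with
  | nil => simp [PySem.Dict.get?]
  | cons p l1 ih =>
    rcases p with ⟨pk, pv⟩
    rw [List.cons_append, PySem.Dict.get?_mk_cons, PySem.Dict.get?_mk_cons]
    by_cases h : pk == k
    · simp [h]
    · simp only [h, if_neg, Bool.false_eq_true, not_false_eq_true, ih]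

theorem get?_mk_len_ne (l : List (List Char × List Char)) (n : Nat)
    (h : ∀ p ∈ l, p.1.length ≠ n) (k : List Char) (hk : k.length = n) :
    (PySem.Dict.mk l).get? k = none := by
  induction l with
  | nil => simp [PySem.Dict.get?]
  | cons p l ih =>
    rw [PySem.Dict.get?_mk_cons]
    have hp : (p.1 == k) = false := by
      rcases hbe : p.1 == k with _ | _
      · rfl
      · exact absurd (by rw [eq_of_beq hbe, hk]) (h p (by simp))
    simp only [hp, Bool.false_eq_true, if_neg, not_false_eq_true]
    exact ih (fun q hq => h q (List.mem_cons_of_mem _ hq))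

theorem romanHindi_mk : romanHindi = PySem.Dict.mk (twoPairs ++ onePairs) := by decide
theorem digraphs_mk : digraphs = PySem.Dict.mk twoPairs := by decide
theorem singles_mk : singles = PySem.Dict.mk onePairs := by decide
theorem twoPairs_len : ∀ p ∈ twoPairs, p.1.length ≠ 1 := by decide
theorem onePairs_len : ∀ p ∈ onePairs, p.1.length ≠ 2 := by decide

theorem get?_digraphs (c1 c2 : Char) :
    PySem.Dict.get? digraphs [c1, c2] = PySem.Dict.get? romanHindi [c1, c2] := by
  rw [romanHindi_mk, digraphs_mk, get?_mk_append,
      get?_mk_len_ne onePairs 2 onePairs_len [c1, c2] rfl, Option.or_none]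

theorem get?_singles (c1 : Char) :
    PySem.Dict.get? singles [c1] = PySem.Dict.get? romanHindi [c1] := by
  rw [romanHindi_mk, singles_mk, get?_mk_append,
      get?_mk_len_ne twoPairs 1 twoPairs_len [c1] rfl, Option.none_or]

-- B's fold computes goB (output accumulated in reverse)

theorem pairsB_cons_cons (c1 c2 : Char) (rest : List Char) :
    pairsB (c1 :: c2 :: rest) = (c1, [c2]) :: pairsB (c2 :: rest) := by
  simp [pairsB]

theorem foldl_stepB_skip (c : Char) (cs : List Char) (acc : List (List Char)) :
    (pairsB (c :: cs)).foldl stepB (true, acc) = (pairsB cs).foldl stepB (false, acc) := by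
  cases cs with
  | nil => simp [pairsB, stepB]
  | cons c2 rest => rw [pairsB_cons_cons]; simp [stepB]

theorem foldl_stepB_eq_goB (cs : List Char) :
    ∀ acc, (pairsB cs).foldl stepB (false, acc) = (false, (goB cs).reverse ++ acc) := by
  induction cs using goB.induct with
  | case1 => intro acc; simp [pairsB, goB]
  | case2 c1 v hv =>
    intro acc
    simp only [pairsB, List.drop_succ_cons, List.drop_nil, List.map_nil, List.nil_append,
      List.zip_cons_cons, List.zip_nil_right, List.foldl_cons, List.foldl_nil]
    simp only [stepB, List.isEmpty_nil, if_true, if_false, Bool.false_eq_true, get?_singles]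
    simp [goB, hv]
  | case3 c1 hv =>
    intro acc
    simp only [pairsB, List.drop_succ_cons, List.drop_nil, List.map_nil, List.nil_append,
      List.zip_cons_cons, List.zip_nil_right, List.foldl_cons, List.foldl_nil]
    simp only [stepB, List.isEmpty_nil, if_true, if_false, Bool.false_eq_true, get?_singles]
    simp [goB, hv]
  | case4 c1 c2 rest v h2 ih =>
    intro acc
    rw [pairsB_cons_cons, List.foldl_cons]
    simp only [stepB, List.isEmpty_cons, if_false, Bool.false_eq_true, get?_digraphs, h2]
    rw [foldl_stepB_skip, ih (v :: acc)]
    simp [goB, h2]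
  | case5 c1 c2 rest h2 v h1 ih =>
    intro acc
    rw [pairsB_cons_cons, List.foldl_cons]
    simp only [stepB, List.isEmpty_cons, if_false, Bool.false_eq_true, get?_digraphs, h2,
      get?_singles, h1]
    rw [ih (v :: acc)]
    simp [goB, h2, h1]
  | case6 c1 c2 rest h2 h1 ih =>
    intro acc
    rw [pairsB_cons_cons, List.foldl_cons]
    simp only [stepB, List.isEmpty_cons, if_false, Bool.false_eq_true, get?_digraphs, h2,
      get?_singles, h1]
    rw [ih acc]
    simp [goB, h2, h1]

-- ===== VERDICT (by name: the statement is the Claim_ definition above) =====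
theorem roman_hindi_to_ipa_spec : Claim_equal_roman_hindi_to_ipa := by
  intro w _
  unfold Spec_roman_hindi_to_ipa roman_hindi_to_ipa roman_hindi_to_ipa_alt
  rw [goA_eq_goB]
  simp [foldl_stepB_eq_goB]
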